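-- pv_equiv track=rewrite | github.com/map-lo/DrumEngine01 | src/tci-reverse-engineering/analyze_segment_mods.py | analyze_segments
-- ===== SOURCE A (Python) =====
-- MARKERS = {0x01, 0x02, 0x04, 0x08, 0x10, 0x20, 0x40, 0x80}
--
-- def analyze_segments(data, start_offset):
--     segments = []
--     i = start_offset
--     while i < len(data):
--         b = data[i]
--         if b in MARKERS:
--             control = b
--             i += 1
--             seg_start = i
--             while i < len(data) and data[i] not in MARKERS:
--                 i += 1
--             seg_len = i - seg_start
--             segments.append((control, seg_start, seg_len))
--         else:
--             i += 1
--     return segments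
-- ===== SOURCE B (Python) =====
-- MARKERS = {0x01, 0x02, 0x04, 0x08, 0x10, 0x20, 0x40, 0x80}
--
-- def analyze_segments(data, start_offset):
--     n = len(data)
--     marks = [i for i in range(max(start_offset, 0), n) if data[i] in MARKERS]
--     ends = marks[1:] + [n]
--     return [(data[p], p + 1, e - (p + 1)) for p, e in zip(marks, ends)]
-- ===== Notes on version B (the rewrite author's own statement) =====
-- stated objective: alternative
-- what changed: A's single interleaved scan with an inner skip-loop is replaced by two distinct passes: first collect all marker indices >= max(start_offset,0) with one comprehension, then pair each marker with its successor (len(data) as sentinel) to emit (byte, pos+1, next-pos-1).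
-- intended difference: For -len(data) <= start_offset < 0 with a marker byte among data[len+start_offset:], A scans through Python's negative-index wraparound and prepends extra segments with non-positive positions; B starts the scan at index 0, the intended reading of a start offset. — e.g. on analyze_segments([1], -1): A returns [(1, 0, 0), (1, 1, 0)], B returns [(1, 1, 0)]
import Mathlib
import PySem

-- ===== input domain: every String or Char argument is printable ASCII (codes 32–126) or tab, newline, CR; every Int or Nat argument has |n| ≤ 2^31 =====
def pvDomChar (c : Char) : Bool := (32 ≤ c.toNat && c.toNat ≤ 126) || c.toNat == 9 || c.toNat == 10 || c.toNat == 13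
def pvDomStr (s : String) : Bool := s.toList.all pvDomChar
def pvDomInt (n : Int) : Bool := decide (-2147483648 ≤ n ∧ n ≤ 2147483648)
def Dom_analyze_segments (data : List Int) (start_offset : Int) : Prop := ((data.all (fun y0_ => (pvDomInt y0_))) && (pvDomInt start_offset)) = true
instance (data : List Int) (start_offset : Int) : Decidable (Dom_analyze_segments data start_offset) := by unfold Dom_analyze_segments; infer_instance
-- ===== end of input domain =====

-- B replaces A's interleaved scan-with-inner-loop by two passes (collect marker indices, then pair
-- consecutive ones); same O(n) cost, objective: alternative decomposition.

-- ===== PORT A =====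
def MARKERS : PySem.Set Int := PySem.Set.ofList [0x01, 0x02, 0x04, 0x08, 0x10, 0x20, 0x40, 0x80]

-- A's inner while loop: advance i while i < len(data) and data[i] not in MARKERS.
-- fuel is a totality guard only: (len - i).toNat iterations always suffice.
def pvInnerA (data : List Int) : Nat → Int → Int
  | 0, i => i
  | fuel + 1, i =>
    if i < (data.length : Int) then
      match PySem.List.pyGet? data i with
      | none => i          -- Python raises IndexError here; outside Pre_
      | some b => if PySem.Set.contains MARKERS b then i else pvInnerA data fuel (i + 1)
    else i

-- A's outer while loop; fuel is again only a totality guard.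
def pvOuterA (data : List Int) : Nat → Int → List (Int × Int × Int) → List (Int × Int × Int)
  | 0, _, segments => segments
  | fuel + 1, i, segments =>
    if i < (data.length : Int) then
      match PySem.List.pyGet? data i with
      | none => segments   -- Python raises IndexError here; outside Pre_
      | some b =>
        if PySem.Set.contains MARKERS b then
          let seg_start := i + 1
          let j := pvInnerA data (((data.length : Int) - seg_start).toNat) seg_start
          pvOuterA data fuel j (segments ++ [(b, seg_start, j - seg_start)])
        else pvOuterA data fuel (i + 1) segments
    else segments

def analyze_segments (data : List Int) (start_offset : Int) : List (Int × Int × Int) :=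
  pvOuterA data (((data.length : Int) - start_offset).toNat) start_offset []

-- ===== PORT B =====
-- Source B: marks = [i for i in range(max(start_offset, 0), n) if data[i] in MARKERS];
--       ends = marks[1:] + [n]; return [(data[p], p+1, e-(p+1)) for p, e in zip(marks, ends)]
-- data[i]/data[p] indices come from range(0 ≤ · < n), so indexing always succeeds: pyGetD is exact.
def analyze_segments_alt (data : List Int) (start_offset : Int) : List (Int × Int × Int) :=
  let n : Int := (data.length : Int)
  let marks : List Int :=
    (PySem.List.pyRange (max start_offset 0) n 1).filter
      (fun i => PySem.Set.contains MARKERS (PySem.List.pyGetD data i 0))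
  let ends : List Int := PySem.List.slice marks (some 1) none ++ [n]
  (marks.zip ends).map (fun pe => (PySem.List.pyGetD data pe.1 0, pe.1 + 1, pe.2 - (pe.1 + 1)))

-- ===== PRECONDITION & SPEC =====
-- Pre_ excludes exactly the inputs where A raises IndexError: start_offset < -len(data).
def Pre_analyze_segments (data : List Int) (start_offset : Int) : Prop :=
  -(data.length : Int) ≤ start_offset

instance (data : List Int) (start_offset : Int) : Decidable (Pre_analyze_segments data start_offset) := by
  unfold Pre_analyze_segments; infer_instance

def pvWitness_analyze_segments : List Int × Int := ([5, 1, 3, 3, 2, 7], 0)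

-- For -len(data) ≤ start_offset < 0 with a marker byte among data[len+start_offset:], A scans via
-- Python's negative-index wraparound and prepends extra segments with non-positive positions;
-- B starts the scan at index 0, the intended reading of a start offset.
def D_analyze_segments (data : List Int) (start_offset : Int) : Prop :=
  start_offset < 0 ∧ -(data.length : Int) ≤ start_offset ∧
    ∃ b ∈ data.drop ((data.length : Int) + start_offset).toNat,
      b ∈ ([1, 2, 4, 8, 16, 32, 64, 128] : List Int)

instance (data : List Int) (start_offset : Int) : Decidable (D_analyze_segments data start_offset) := by
  unfold D_analyze_segments; infer_instance

def Spec_analyze_segments (data : List Int) (start_offset : Int) (out : List (Int × Int × Int)) : Prop :=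
  ¬ D_analyze_segments data start_offset → out = analyze_segments_alt data start_offset

instance (data : List Int) (start_offset : Int) (out : List (Int × Int × Int)) : Decidable (Spec_analyze_segments data start_offset out) := by
  unfold Spec_analyze_segments; infer_instance

def pvDiffWitness_analyze_segments : List Int × Int := ([1], -1)

def pvDiffWitnessOut_analyze_segments : (List (Int × Int × Int)) × (List (Int × Int × Int)) :=
  ([(1, 0, 0), (1, 1, 0)], [(1, 1, 0)])

-- ===== CLAIM (what is proved, stated in full; the proofs are below) =====
def Claim_unchanged_analyze_segments : Prop := ∀ (data : List Int) (start_offset : Int), Dom_analyze_segments data start_offset → Pre_analyze_segments data start_offset → Spec_analyze_segments data start_offset (analyze_segments data start_offset)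

def Claim_changed_analyze_segments : Prop := Dom_analyze_segments (pvDiffWitness_analyze_segments.1) (pvDiffWitness_analyze_segments.2) ∧ Pre_analyze_segments (pvDiffWitness_analyze_segments.1) (pvDiffWitness_analyze_segments.2) ∧ D_analyze_segments (pvDiffWitness_analyze_segments.1) (pvDiffWitness_analyze_segments.2) ∧ analyze_segments (pvDiffWitness_analyze_segments.1) (pvDiffWitness_analyze_segments.2) = pvDiffWitnessOut_analyze_segments.1 ∧ analyze_segments_alt (pvDiffWitness_analyze_segments.1) (pvDiffWitness_analyze_segments.2) = pvDiffWitnessOut_analyze_segments.2 ∧ pvDiffWitnessOut_analyze_segments.1 ≠ pvDiffWitnessOut_analyze_segments.2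

def Claim_exact_analyze_segments : Prop := ∀ (data : List Int) (start_offset : Int), Dom_analyze_segments data start_offset → Pre_analyze_segments data start_offset → D_analyze_segments data start_offset → analyze_segments data start_offset ≠ analyze_segments_alt data start_offset

-- ===== LEMMAS AND PROOFS =====

-- the list of marker indices ≥ i (B's first pass, parametrised by the lower bound)
def pvMarks (data : List Int) (i : Int) : List Int :=
  (PySem.List.pyRange i (data.length : Int) 1).filter
    (fun k => PySem.Set.contains MARKERS (PySem.List.pyGetD data k 0))

-- B's second pass as a structural recursion over the marker list
def pvPair (data : List Int) : List Int → List (Int × Int × Int)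
  | [] => []
  | p :: rest =>
    (PySem.List.pyGetD data p 0, p + 1, rest.head?.getD (data.length : Int) - (p + 1)) :: pvPair data rest

theorem pvPair_zip (data : List Int) (ms : List Int) :
    (ms.zip (ms.tail ++ [(data.length : Int)])).map
        (fun pe => (PySem.List.pyGetD data pe.1 0, pe.1 + 1, pe.2 - (pe.1 + 1)))
      = pvPair data ms := by
  induction ms with
  | nil => simp [pvPair]
  | cons p rest ih =>
    cases rest with
    | nil => simp [pvPair]
    | cons q t =>
      simp only [List.tail_cons, List.cons_append, List.zip_cons_cons, List.map_cons, pvPair,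
        List.cons.injEq]
      exact ⟨rfl, by simpa [pvPair] using ih⟩

theorem alt_eq_pair (data : List Int) (s : Int) :
    analyze_segments_alt data s = pvPair data (pvMarks data (max s 0)) := by
  show ((pvMarks data (max s 0)).zip
      (PySem.List.slice (pvMarks data (max s 0)) (some 1) none ++ [(data.length : Int)])).map
        (fun pe => (PySem.List.pyGetD data pe.1 0, pe.1 + 1, pe.2 - (pe.1 + 1)))
      = pvPair data (pvMarks data (max s 0))
  rw [PySem.List.slice_from_one]
  exact pvPair_zip data (pvMarks data (max s 0))

theorem pvMarks_hi (data : List Int) (i : Int) (h : (data.length : Int) ≤ i) :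
    pvMarks data i = [] := by
  unfold pvMarks
  rw [PySem.List.pyRange_one]
  have : ((data.length : Int) - i).toNat = 0 := by omega
  rw [this]
  simp

theorem pvMarks_cons (data : List Int) (i : Int) (h : i < (data.length : Int)) :
    pvMarks data i =
      if PySem.Set.contains MARKERS (PySem.List.pyGetD data i 0) then
        i :: pvMarks data (i + 1)
      else pvMarks data (i + 1) := by
  unfold pvMarks
  rw [PySem.List.pyRange_one_cons h]
  simp only [List.filter_cons]

-- the inner loop: it does not move left, stays ≤ len, skips no marker, and stops on one
theorem pvInnerA_spec (data : List Int) :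
    ∀ (N : Nat) (k : Int), 0 ≤ k → k ≤ (data.length : Int) →
      ((data.length : Int) - k).toNat ≤ N →
      (k ≤ pvInnerA data N k ∧ pvInnerA data N k ≤ (data.length : Int) ∧
        pvMarks data k = pvMarks data (pvInnerA data N k) ∧
        (pvInnerA data N k < (data.length : Int) →
          PySem.Set.contains MARKERS (PySem.List.pyGetD data (pvInnerA data N k) 0) = true)) := by
  intro N
  induction N with
  | zero =>
    intro k h0 hk hN
    refine ⟨?_, ?_, ?_, ?_⟩ <;> simp only [pvInnerA]
    · exact le_refl k
    · exact hk
    · intro h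
      exact absurd h (by omega)
  | succ n ih =>
    intro k h0 hk hN
    by_cases hlt : k < (data.length : Int)
    · have hget : PySem.List.pyGet? data k = some data[k.toNat] :=
        PySem.List.pyGet?_eq_some_getElem data h0 hlt
      have hgd : PySem.List.pyGetD data k 0 = data[k.toNat] :=
        PySem.List.pyGetD_eq_getElem data 0 h0 hlt
      by_cases hc : PySem.Set.contains MARKERS data[k.toNat] = true
      · have hv : pvInnerA data (n + 1) k = k := by
          simp only [pvInnerA, if_pos hlt, hget]
          rw [if_pos hc]
        rw [hv]
        exact ⟨le_refl k, le_of_lt hlt, rfl, fun _ => by rw [hgd]; exact hc⟩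
      · have hv : pvInnerA data (n + 1) k = pvInnerA data n (k + 1) := by
          simp only [pvInnerA, if_pos hlt, hget]
          rw [if_neg hc]
        rw [hv]
        have hrec := ih (k + 1) (by omega) (by omega) (by omega)
        refine ⟨by omega, hrec.2.1, ?_, hrec.2.2.2⟩
        rw [pvMarks_cons data k hlt, hgd, if_neg hc]
        exact hrec.2.2.1
    · have hv : pvInnerA data (n + 1) k = k := by
        simp only [pvInnerA, if_neg hlt]
      rw [hv]
      exact ⟨le_refl k, hk, rfl, fun h => absurd h hlt⟩

-- the outer loop computes B's pairing of the marker list from its current index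
theorem pvOuterA_spec (data : List Int) :
    ∀ (N : Nat) (k : Int) (acc : List (Int × Int × Int)), 0 ≤ k →
      ((data.length : Int) - k).toNat ≤ N →
      pvOuterA data N k acc = acc ++ pvPair data (pvMarks data k) := by
  intro N
  induction N with
  | zero =>
    intro k acc h0 hN
    have hk : (data.length : Int) ≤ k := by omega
    simp [pvOuterA, pvMarks_hi data k hk, pvPair]
  | succ n ih =>
    intro k acc h0 hN
    by_cases hlt : k < (data.length : Int)
    · have hget : PySem.List.pyGet? data k = some data[k.toNat] :=
        PySem.List.pyGet?_eq_some_getElem data h0 hlt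
      have hgd : PySem.List.pyGetD data k 0 = data[k.toNat] :=
        PySem.List.pyGetD_eq_getElem data 0 h0 hlt
      by_cases hc : PySem.Set.contains MARKERS data[k.toNat] = true
      · set j := pvInnerA data (((data.length : Int) - (k + 1)).toNat) (k + 1) with hj
        have hv : pvOuterA data (n + 1) k acc =
            pvOuterA data n j (acc ++ [(data[k.toNat], k + 1, j - (k + 1))]) := by
          simp only [pvOuterA, if_pos hlt, hget]
          rw [if_pos hc]
        have hspec := pvInnerA_spec data (((data.length : Int) - (k + 1)).toNat) (k + 1)
          (by omega) (by omega) (le_refl _)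
        rw [← hj] at hspec
        obtain ⟨hj1, hj2, hj3, hj4⟩ := hspec
        rw [hv, ih j _ (by omega) (by omega)]
        rw [pvMarks_cons data k hlt, hgd, if_pos hc, hj3]
        have hhead : (pvMarks data j).head?.getD (data.length : Int) = j := by
          by_cases hjm : j < (data.length : Int)
          · rw [pvMarks_cons data j hjm, if_pos (hj4 hjm)]
            rfl
          · rw [pvMarks_hi data j (by omega)]
            show (data.length : Int) = j
            omega
        simp only [pvPair, hhead, hgd, List.append_assoc, List.cons_append, List.nil_append]
      · have hv : pvOuterA data (n + 1) k acc = pvOuterA data n (k + 1) acc := by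
          simp only [pvOuterA, if_pos hlt, hget]
          rw [if_neg hc]
        rw [hv, ih (k + 1) acc (by omega) (by omega)]
        rw [pvMarks_cons data k hlt, hgd, if_neg hc]
    · have hk : (data.length : Int) ≤ k := by omega
      simp [pvOuterA, hlt, pvMarks_hi data k hk, pvPair]

-- negative indices j with -len ≤ j < 0 read the element at len + j
theorem pyGet?_neg_wrap (data : List Int) (j : Int) (h1 : -(data.length : Int) ≤ j) (h2 : j < 0) :
    ∃ (t : Nat) (ht : t < data.length), ((t : Int) = (data.length : Int) + j) ∧
      PySem.List.pyGet? data j = some (data[t]'ht) := by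
  have hk : 0 < (-j).toNat ∧ (-j).toNat ≤ data.length := by omega
  have hj : j = -(((-j).toNat : Nat) : Int) := by omega
  have ht : data.length - (-j).toNat < data.length := by omega
  have h4 : PySem.List.pyGet? data j = data[data.length - (-j).toNat]? := by
    conv_lhs => rw [hj]
    exact PySem.List.pyGet?_neg_natCast data (-j).toNat hk.1 hk.2
  refine ⟨data.length - (-j).toNat, ht, by omega, ?_⟩
  rw [h4]
  exact List.getElem?_eq_getElem ht
-- scanning from a negative index over non-marker bytes reaches the scan from 0
theorem pvOuterA_neg (data : List Int) :
    ∀ (N : Nat) (k : Int) (acc : List (Int × Int × Int)),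
      -(data.length : Int) ≤ k → k ≤ 0 → ((data.length : Int) - k).toNat ≤ N →
      (∀ (j : Int), k ≤ j → j < 0 → ∀ b, PySem.List.pyGet? data j = some b →
        PySem.Set.contains MARKERS b = false) →
      pvOuterA data N k acc = acc ++ pvPair data (pvMarks data 0) := by
  intro N
  induction N with
  | zero =>
    intro k acc h1 h2 hN _
    have hm : (data.length : Int) = 0 := by omega
    simp [pvOuterA, pvMarks_hi data 0 (by omega), pvPair]
  | succ n ih =>
    intro k acc h1 h2 hN hH
    by_cases hk0 : k = 0
    · subst hk0
      exact pvOuterA_spec data (n + 1) 0 acc (le_refl 0) hN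
    · have hkneg : k < 0 := by omega
      have hlt : k < (data.length : Int) := by omega
      obtain ⟨t, ht, htv, hget⟩ := pyGet?_neg_wrap data k h1 hkneg
      have hc : PySem.Set.contains MARKERS data[t] = false :=
        hH k (le_refl k) hkneg data[t] hget
      simp only [pvOuterA, if_pos hlt, hget]
      rw [if_neg (by rw [hc]; exact Bool.false_ne_true)]
      exact ih (k + 1) acc (by omega) (by omega) (by omega)
        (fun j hj hj2 b hb => hH j (by omega) hj2 b hb)

-- every position B emits is ≥ 1
theorem pvPair_pos (data : List Int) :
    ∀ (ms : List Int), (∀ p ∈ ms, 0 ≤ p) → ∀ x ∈ pvPair data ms, 1 ≤ x.2.1 := by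
  intro ms
  induction ms with
  | nil => intro _ x hx; simp [pvPair] at hx
  | cons p rest ih =>
    intro hp x hx
    simp only [pvPair, List.mem_cons] at hx
    rcases hx with rfl | hx
    · have := hp p (by simp); simpa using by omega
    · exact ih (fun q hq => hp q (by simp [hq])) x hx

theorem pvMarks_nonneg (data : List Int) (i : Int) (h : 0 ≤ i) :
    ∀ p ∈ pvMarks data i, 0 ≤ p := by
  intro p hp
  unfold pvMarks at hp
  have h1 := (List.mem_filter.mp hp).1
  have h2 := PySem.List.mem_pyRange_one.mp h1
  omega

-- accumulator lemma for the outer loop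
theorem pvOuterA_acc (data : List Int) :
    ∀ (N : Nat) (k : Int) (acc : List (Int × Int × Int)),
      pvOuterA data N k acc = acc ++ pvOuterA data N k [] := by
  intro N
  induction N with
  | zero => intro k acc; simp [pvOuterA]
  | succ n ih =>
    intro k acc
    by_cases hlt : k < (data.length : Int)
    · cases hg : PySem.List.pyGet? data k with
      | none => simp [pvOuterA, hg]
      | some b =>
        by_cases hc : PySem.Set.contains MARKERS b = true
        · have e1 : ∀ (a : List (Int × Int × Int)), pvOuterA data (n + 1) k a =
              pvOuterA data n (pvInnerA data (((data.length : Int) - (k + 1)).toNat) (k + 1))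
                (a ++ [(b, k + 1,
                  pvInnerA data (((data.length : Int) - (k + 1)).toNat) (k + 1) - (k + 1))]) := by
            intro a
            simp only [pvOuterA, if_pos hlt, hg]
            rw [if_pos hc]
          rw [e1 acc, e1 [], ih _ (acc ++ _), ih _ ([] ++ _)]
          simp
        · have e1 : ∀ (a : List (Int × Int × Int)),
              pvOuterA data (n + 1) k a = pvOuterA data n (k + 1) a := by
            intro a
            simp only [pvOuterA, if_pos hlt, hg]
            rw [if_neg hc]
          rw [e1 acc, e1 [], ih (k + 1) acc]
    · simp [pvOuterA, hlt]

-- with a marker in the wrapped region, the first segment A emits has position ≤ 0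
theorem pvOuterA_neg_first (data : List Int) :
    ∀ (N : Nat) (k : Int),
      -(data.length : Int) ≤ k → k < 0 → ((data.length : Int) - k).toNat ≤ N →
      (∃ (j : Int), k ≤ j ∧ j < 0 ∧ ∃ b, PySem.List.pyGet? data j = some b ∧
        PySem.Set.contains MARKERS b = true) →
      ∃ b p l rest, pvOuterA data N k [] = (b, p, l) :: rest ∧ p ≤ 0 := by
  intro N
  induction N with
  | zero => intro k h1 h2 hN _; omega
  | succ n ih =>
    intro k h1 h2 hN hex
    have hlt : k < (data.length : Int) := by omega
    obtain ⟨t, ht, htv, hget⟩ := pyGet?_neg_wrap data k h1 h2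
    by_cases hc : PySem.Set.contains MARKERS data[t] = true
    · have e1 : pvOuterA data (n + 1) k [] =
          (data[t], k + 1,
            pvInnerA data (((data.length : Int) - (k + 1)).toNat) (k + 1) - (k + 1)) ::
            pvOuterA data n (pvInnerA data (((data.length : Int) - (k + 1)).toNat) (k + 1)) [] := by
        simp only [pvOuterA, if_pos hlt, hget]
        rw [if_pos hc, pvOuterA_acc]
        simp
      exact ⟨data[t], k + 1, _, _, e1, by omega⟩
    · obtain ⟨j, hj1, hj2, b, hb, hbc⟩ := hex
      have hjk : j ≠ k := by
        intro h; subst h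
        rw [hget] at hb
        cases hb
        rw [hbc] at hc; exact hc rfl
      by_cases hk1 : k + 1 = 0
      · exfalso; omega
      · simp only [pvOuterA, if_pos hlt, hget]
        rw [if_neg hc]
        exact ih (k + 1) (by omega) (by omega) (by omega)
          ⟨j, by omega, hj2, b, hb, hbc⟩

-- membership of a wrapped-region byte in the drop slice, for building D_'s witness and its converse
theorem drop_mem_of_wrap (data : List Int) (s : Int) (t : Nat)
    (ht : t < data.length)
    (hge : ((data.length : Int) + s).toNat ≤ t) :
    data[t] ∈ data.drop ((data.length : Int) + s).toNat := by
  have h1 : t - ((data.length : Int) + s).toNat < (data.drop ((data.length : Int) + s).toNat).length := by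
    rw [List.length_drop]; omega
  have h2 : (data.drop ((data.length : Int) + s).toNat)[t - ((data.length : Int) + s).toNat] = data[t] := by
    rw [List.getElem_drop]
    congr 1
    omega
  rw [← h2]
  exact List.getElem_mem h1

-- ===== VERDICT (by name: the statement is the Claim_ definition above) =====
theorem analyze_segments_spec : Claim_unchanged_analyze_segments := by
  intro data s _ hpre hnd
  unfold Pre_analyze_segments at hpre
  rw [alt_eq_pair]
  unfold analyze_segments
  by_cases hs : 0 ≤ s
  · rw [pvOuterA_spec data _ s [] hs (le_refl _)]
    rw [max_eq_left hs]
    simp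
  · have hs0 : s < 0 := by omega
    rw [max_eq_right (by omega)]
    rw [pvOuterA_neg data _ s [] hpre (by omega) (le_refl _) ?_]
    · simp
    · intro j hj hj2 b hb
      by_contra hcon
      apply hnd
      refine ⟨hs0, hpre, b, ?_, ?_⟩
      · obtain ⟨t, ht, htv, hget⟩ := pyGet?_neg_wrap data j (by omega) hj2
        rw [hget] at hb; cases hb
        exact drop_mem_of_wrap data s t ht (by omega)
      · have hct : PySem.Set.contains MARKERS b = true := by
          cases h : PySem.Set.contains MARKERS b
          · exact absurd h hcon
          · rfl
        have := (PySem.Set.contains_iff MARKERS b).mp hct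
        rw [show MARKERS = PySem.Set.ofList [1, 2, 4, 8, 16, 32, 64, 128] from rfl,
          PySem.Set.mem_ofList] at this
        exact this

theorem analyze_segments_changed : Claim_changed_analyze_segments := by
  unfold Claim_changed_analyze_segments; decide

theorem analyze_segments_tight : Claim_exact_analyze_segments := by
  intro data s _ hpre hd heq
  obtain ⟨hs0, hpre', b, hbmem, hbmk⟩ := hd
  -- get a wrapped-region index j with a marker
  obtain ⟨u, hu, hub⟩ := List.getElem_of_mem hbmem
  have hulen : ((data.length : Int) + s).toNat + u < data.length := by
    have := hu; rw [List.length_drop] at this; omega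
  have hjb : PySem.List.pyGet? data (s + u) = some b := by
    obtain ⟨t, ht, htv, hget⟩ := pyGet?_neg_wrap data (s + u)
      (by omega) (by omega)
    rw [hget]
    congr 1
    rw [← hub, List.getElem_drop]
    congr 1
    omega
  have hfirst := pvOuterA_neg_first data (((data.length : Int) - s).toNat) s hpre' hs0 (le_refl _)
    ⟨s + u, by omega, by omega, b, hjb, by
      rw [PySem.Set.contains_iff MARKERS b,
        show MARKERS = PySem.Set.ofList [1, 2, 4, 8, 16, 32, 64, 128] from rfl,
        PySem.Set.mem_ofList]
      exact hbmk⟩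
  obtain ⟨b', p, l, rest, hA, hple⟩ := hfirst
  rw [alt_eq_pair] at heq
  unfold analyze_segments at heq
  rw [hA] at heq
  have hBpos := pvPair_pos data (pvMarks data (max s 0))
    (pvMarks_nonneg data (max s 0) (by omega))
  rw [← heq] at hBpos
  have := hBpos (b', p, l) (by simp)
  simp at this
  omega
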